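-- pv_equiv track=rewrite | github.com/rustleupchef/codewars | main.py | thirteen
-- ===== SOURCE A (Python) =====
-- def thirteen(box: str) -> str:
--     (width, length) = (len(box.split("\n")[0]),len(box.split("\n")))
--     newBox = ""
--     for i in range(length):
--         for j in range(width):
--             if (i == 0 or i == length - 1) or (j == 0 or j == width - 1):
--                 newBox += "*"
--                 continue
--             newBox += " "
--         newBox += "\n"
--
--     newBox = newBox[0:-1]
--     if (box == newBox):
--         return "Nothing to do"
--
--     return newBox
-- ===== SOURCE B (Python) =====
-- def thirteen(box: str) -> str:
--     lines = box.split("\n")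
--     width, length = len(lines[0]), len(lines)
--     top = "*" * width
--     mid = "*" + " " * (width - 2) + "*" if width >= 2 else top
--     rows = [top] if length == 1 else [top] + [mid] * (length - 2) + [top]
--     newBox = "\n".join(rows)
--     return "Nothing to do" if box == newBox else newBox
-- ===== Notes on version B (the rewrite author's own statement) =====
-- stated objective: simpler
-- what changed: Computes the top/border row and the interior row each once via string repetition and replicates the interior row (length-2) times in a list joined by newlines, eliminating A's nested per-cell loop with its quadratic-cost character-by-character string appends and the trailing-newline slice.
import Mathlib
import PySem

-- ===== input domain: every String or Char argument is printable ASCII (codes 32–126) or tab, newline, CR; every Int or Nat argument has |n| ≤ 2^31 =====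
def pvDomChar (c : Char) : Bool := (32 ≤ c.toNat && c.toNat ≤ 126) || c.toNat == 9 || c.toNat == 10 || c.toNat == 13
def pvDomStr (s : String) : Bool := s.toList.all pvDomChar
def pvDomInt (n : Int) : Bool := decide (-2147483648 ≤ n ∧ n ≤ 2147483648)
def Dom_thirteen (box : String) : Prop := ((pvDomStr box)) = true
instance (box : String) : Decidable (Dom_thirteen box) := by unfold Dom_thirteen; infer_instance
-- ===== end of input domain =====

-- B builds the border row and the interior row once each by repetition and replicates the
-- interior row, joining with newlines — no per-cell loop, no trailing-newline slice (objective: simpler).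

-- ===== PORT A =====
-- literal transliteration of A: nested loops appending one char at a time,
-- then newBox[0:-1], then the comparison with the input.
def thirteen (box : String) : String :=
  let lines := PySem.Chars.splitOn box.toList ['\n']
  let width : Int := PySem.Chars.len (PySem.List.pyGetD lines 0 [])   -- lines is never empty, so lines[0] never raises
  let length : Int := PySem.List.len lines
  let newBox : List Char :=
    (PySem.List.pyRange 0 length).foldl (fun acc i =>
      ((PySem.List.pyRange 0 width).foldl (fun acc j =>
        if (i == 0 || i == length - 1) || (j == 0 || j == width - 1) then acc ++ ['*']
        else acc ++ [' ']) acc) ++ ['\n']) []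
  let newBox := PySem.List.slice newBox (some 0) (some (-1))
  if box.toList = newBox then "Nothing to do" else String.mk newBox

-- ===== PORT B =====
-- literal transliteration of B: 'top' and 'mid' built once by repetition (Python single-char
-- string repetition ported by hand as List.replicate, exact), the row list is [top], or
-- top, (length-2) copies of mid, top, joined with the newline separator.
def thirteen_alt (box : String) : String :=
  let lines := PySem.Chars.splitOn box.toList ['\n']
  let width : Int := PySem.Chars.len (PySem.List.pyGetD lines 0 [])
  let length : Int := PySem.List.len lines
  let top : List Char := List.replicate width.toNat '*'
  let mid : List Char :=
    if width ≥ 2 then '*' :: (List.replicate (width - 2).toNat ' ' ++ ['*']) else top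
  let rows : List (List Char) :=
    if length == 1 then [top] else top :: (List.replicate (length - 2).toNat mid ++ [top])
  let newBox := PySem.Chars.join ['\n'] rows
  if box.toList = newBox then "Nothing to do" else String.mk newBox

-- ===== PRECONDITION & SPEC =====
def Spec_thirteen (box : String) (out : String) : Prop := out = thirteen_alt box
instance (box : String) (out : String) : Decidable (Spec_thirteen box out) := by unfold Spec_thirteen; infer_instance

-- ===== CLAIM =====
def Claim_equal_thirteen : Prop := ∀ (box : String), Dom_thirteen box → Spec_thirteen box (thirteen box)

-- ===== LEMMAS AND PROOFS =====

-- splitOn never returns the empty list (Python's str.split always yields ≥ 1 piece)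
lemma splitOn_go_ne_nil (sep : List Char) :
    ∀ (fuel : Nat) (l cur : List Char) (acc : List (List Char)),
      PySem.Chars.splitOn.go sep fuel l cur acc ≠ [] := by
  intro fuel
  induction fuel with
  | zero => intro l cur acc; simp [PySem.Chars.splitOn.go]
  | succ n ih =>
    intro l cur acc
    cases l with
    | nil => simp [PySem.Chars.splitOn.go]
    | cons c rest =>
      rw [PySem.Chars.splitOn.go]
      split
      · exact ih _ _ _
      · exact ih _ _ _

lemma splitOn_ne_nil' (s sep : List Char) : PySem.Chars.splitOn s sep ≠ [] := by
  unfold PySem.Chars.splitOn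
  exact splitOn_go_ne_nil _ _ _ _ _

-- constant map over a 1-step range is replicate
lemma map_const_pyRange (b : Int) (c : Char) :
    (PySem.List.pyRange 0 b).map (fun _ => c) = List.replicate b.toNat c := by
  simp [List.map_const', PySem.List.length_pyRange_one]

-- the row A's inner loop produces, as a map over the range
lemma rowA_eq (L W i : Int) (hW : 0 ≤ W) :
    (PySem.List.pyRange 0 W).map
      (fun j => if (i == 0 || i == L - 1) || (j == 0 || j == W - 1) then '*' else ' ')
    = (if i == 0 || i == L - 1 || W < 2 then List.replicate W.toNat '*'
       else '*' :: (List.replicate (W - 2).toNat ' ' ++ ['*'])) := by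
  by_cases hb : i = 0 ∨ i = L - 1
  · have : (i == 0 || i == L - 1) = true := by
      rcases hb with h | h <;> simp [h]
    rw [show (if i == 0 || i == L - 1 || W < 2 then List.replicate W.toNat '*'
       else '*' :: (List.replicate (W - 2).toNat ' ' ++ ['*'])) = List.replicate W.toNat '*' by
        simp [this]]
    rw [← map_const_pyRange W '*']
    exact List.map_congr_left (fun j _ => by simp [this])
  · rw [not_or] at hb
    obtain ⟨h0, h1⟩ := hb
    have hb' : (i == 0 || i == L - 1) = false := by simp [h0, h1]
    by_cases hw : W < 2
    · -- degenerate widths 0 and 1: every cell is on the border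
      interval_cases W
      · simp [PySem.List.pyRange_one_eq_nil]
      · rw [PySem.List.pyRange_one_cons (by norm_num), PySem.List.pyRange_one_eq_nil (by norm_num)]
        simp [hb']
    · rw [not_lt] at hw
      have hcond : (i == 0 || i == L - 1 || W < 2) = false := by
        simp [h0, h1, not_lt.mpr hw]
      rw [hcond]
      simp only [Bool.false_eq_true, if_false]
      -- peel first and last index of the range
      have hsplit : PySem.List.pyRange 0 W = 0 :: (PySem.List.pyRange 1 (W - 1) ++ [W - 1]) := by
        rw [PySem.List.pyRange_one_cons (by omega)]
        congr 1
        have := PySem.List.pyRange_one_succ_right (a := 1) (b := W - 1) (by omega)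
        simpa [sub_add_cancel] using this
      rw [hsplit]
      simp only [List.map_cons, List.map_append, List.map_cons, List.map_nil]
      have hmid : (PySem.List.pyRange 1 (W - 1)).map
          (fun j => if (i == 0 || i == L - 1) || (j == 0 || j == W - 1) then '*' else ' ')
          = List.replicate (W - 2).toNat ' ' := by
        have : (PySem.List.pyRange 1 (W - 1)).map
            (fun j => if (i == 0 || i == L - 1) || (j == 0 || j == W - 1) then '*' else ' ')
            = (PySem.List.pyRange 1 (W - 1)).map (fun _ => ' ') := by
          refine List.map_congr_left (fun j hj => ?_)
          rw [PySem.List.mem_pyRange_one] at hj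
          have hj0 : j ≠ 0 := by omega
          have hj1 : j ≠ W - 1 := by omega
          simp [hb', hj0, hj1]
        rw [this]
        simp [List.map_const', PySem.List.length_pyRange_one]
        omega
      rw [hmid]
      simp

-- dropping the final '\n' of the concatenation of '\n'-terminated rows is the join
lemma dropLast_flatten_eq_join (rs : List (List Char)) (h : rs ≠ []) :
    ((rs.map (fun r => r ++ ['\n'])).flatten).dropLast = PySem.Chars.join ['\n'] rs := by
  induction rs with
  | nil => exact absurd rfl h
  | cons r rest ih =>
    cases rest with
    | nil => simp [PySem.Chars.join_singleton]
    | cons q rest' =>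
      have hix := ih (by simp)
      simp only [List.map_cons, List.flatten_cons, List.append_assoc] at hix ⊢
      rw [PySem.Chars.join_cons_cons]
      rw [List.dropLast_append_of_ne_nil (by simp)]
      rw [List.dropLast_append_of_ne_nil (by simp)]
      rw [hix]
      simp

-- A's accumulated string is the flatMap of '\n'-terminated rows
lemma bigA_eq (L W : Int) :
    (PySem.List.pyRange 0 L).foldl (fun acc i =>
      ((PySem.List.pyRange 0 W).foldl (fun acc j =>
        if (i == 0 || i == L - 1) || (j == 0 || j == W - 1) then acc ++ ['*']
        else acc ++ [' ']) acc) ++ ['\n']) []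
    = (PySem.List.pyRange 0 L).flatMap (fun i =>
        ((PySem.List.pyRange 0 W).map
          (fun j => if (i == 0 || i == L - 1) || (j == 0 || j == W - 1) then '*' else ' ')) ++ ['\n']) := by
  have hstep : (fun (acc : List Char) i =>
      ((PySem.List.pyRange 0 W).foldl (fun acc j =>
        if (i == 0 || i == L - 1) || (j == 0 || j == W - 1) then acc ++ ['*']
        else acc ++ [' ']) acc) ++ ['\n'])
      = (fun acc i => acc ++
          (((PySem.List.pyRange 0 W).map
            (fun j => if (i == 0 || i == L - 1) || (j == 0 || j == W - 1) then '*' else ' ')) ++ ['\n'])) := by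
    funext acc i
    have hinner : (fun (acc : List Char) j =>
        if (i == 0 || i == L - 1) || (j == 0 || j == W - 1) then acc ++ ['*'] else acc ++ [' '])
        = (fun acc j => acc ++
            [if (i == 0 || i == L - 1) || (j == 0 || j == W - 1) then '*' else ' ']) := by
      funext acc j
      split <;> rfl
    rw [hinner, PySem.List.foldl_append_singleton_eq_map, List.append_assoc]
  rw [hstep, PySem.List.foldl_append_eq_flatMap]
  simp

-- A's row list (as a map over range(length)) equals B's explicit top/replicated-mid/top list
lemma mapRows_eq (L : Int) (hL : 1 ≤ L) (T M : List Char) :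
    (PySem.List.pyRange 0 L).map (fun i => if i == 0 || i == L - 1 then T else M)
    = (if L == 1 then [T] else T :: (List.replicate (L - 2).toNat M ++ [T])) := by
  by_cases h1 : L = 1
  · subst h1
    rw [PySem.List.pyRange_one_cons (by norm_num), PySem.List.pyRange_one_eq_nil (by norm_num)]
    simp
  · have h2 : 2 ≤ L := by omega
    have hne : (L == 1) = false := by simp [h1]
    rw [hne]
    simp only [Bool.false_eq_true, if_false]
    have hsplit : PySem.List.pyRange 0 L = 0 :: (PySem.List.pyRange 1 (L - 1) ++ [L - 1]) := by
      rw [PySem.List.pyRange_one_cons (by omega)]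
      congr 1
      have := PySem.List.pyRange_one_succ_right (a := 1) (b := L - 1) (by omega)
      simpa [sub_add_cancel] using this
    rw [hsplit]
    simp only [List.map_cons, List.map_append, List.map_nil]
    have hmid : (PySem.List.pyRange 1 (L - 1)).map
        (fun i => if i == 0 || i == L - 1 then T else M)
        = List.replicate (L - 2).toNat M := by
      have : (PySem.List.pyRange 1 (L - 1)).map
          (fun i => if i == 0 || i == L - 1 then T else M)
          = (PySem.List.pyRange 1 (L - 1)).map (fun _ => M) := by
        refine List.map_congr_left (fun i hi => ?_)
        rw [PySem.List.mem_pyRange_one] at hi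
        have hi0 : i ≠ 0 := by omega
        have hi1 : i ≠ L - 1 := by omega
        simp [hi0, hi1]
      rw [this]
      simp [List.map_const', PySem.List.length_pyRange_one]
      omega
    rw [hmid]
    simp

-- the two constructed boxes coincide
lemma boxes_eq (L W : Int) (hL : 1 ≤ L) (hW : 0 ≤ W) :
    PySem.List.slice
      ((PySem.List.pyRange 0 L).foldl (fun acc i =>
        ((PySem.List.pyRange 0 W).foldl (fun acc j =>
          if (i == 0 || i == L - 1) || (j == 0 || j == W - 1) then acc ++ ['*']
          else acc ++ [' ']) acc) ++ ['\n']) []) (some 0) (some (-1))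
    = PySem.Chars.join ['\n']
        (if L == 1 then [List.replicate W.toNat '*']
         else List.replicate W.toNat '*' ::
           (List.replicate (L - 2).toNat
              (if W ≥ 2 then '*' :: (List.replicate (W - 2).toNat ' ' ++ ['*'])
               else List.replicate W.toNat '*')
            ++ [List.replicate W.toNat '*'])) := by
  rw [bigA_eq]
  rw [show PySem.List.slice
      ((PySem.List.pyRange 0 L).flatMap (fun i =>
        ((PySem.List.pyRange 0 W).map
          (fun j => if (i == 0 || i == L - 1) || (j == 0 || j == W - 1) then '*' else ' ')) ++ ['\n']))
      (some 0) (some (-1))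
    = ((PySem.List.pyRange 0 L).flatMap (fun i =>
        ((PySem.List.pyRange 0 W).map
          (fun j => if (i == 0 || i == L - 1) || (j == 0 || j == W - 1) then '*' else ' ')) ++ ['\n'])).dropLast by
      simp [PySem.List.slice_to_neg_one]]
  rw [List.flatMap_def]
  rw [show (PySem.List.pyRange 0 L).map (fun i =>
        ((PySem.List.pyRange 0 W).map
          (fun j => if (i == 0 || i == L - 1) || (j == 0 || j == W - 1) then '*' else ' ')) ++ ['\n'])
      = ((PySem.List.pyRange 0 L).map (fun i =>
          (PySem.List.pyRange 0 W).map
            (fun j => if (i == 0 || i == L - 1) || (j == 0 || j == W - 1) then '*' else ' '))).map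
          (fun r => r ++ ['\n']) by rw [List.map_map]; rfl]
  rw [dropLast_flatten_eq_join _ (by
      intro hcontra
      have := congrArg List.length hcontra
      simp [PySem.List.length_pyRange_one] at this
      omega)]
  congr 1
  rw [show (PySem.List.pyRange 0 L).map (fun i =>
        (PySem.List.pyRange 0 W).map
          (fun j => if (i == 0 || i == L - 1) || (j == 0 || j == W - 1) then '*' else ' '))
      = (PySem.List.pyRange 0 L).map (fun i =>
          if i == 0 || i == L - 1 || W < 2 then List.replicate W.toNat '*'
          else '*' :: (List.replicate (W - 2).toNat ' ' ++ ['*'])) from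
    List.map_congr_left (fun i _ => rowA_eq L W i hW)]
  rw [show (PySem.List.pyRange 0 L).map (fun i =>
          if i == 0 || i == L - 1 || W < 2 then List.replicate W.toNat '*'
          else '*' :: (List.replicate (W - 2).toNat ' ' ++ ['*']))
      = (PySem.List.pyRange 0 L).map (fun i =>
          if i == 0 || i == L - 1 then List.replicate W.toNat '*'
          else (if W ≥ 2 then '*' :: (List.replicate (W - 2).toNat ' ' ++ ['*'])
                else List.replicate W.toNat '*')) from
    List.map_congr_left (fun i _ => by
      by_cases hw : W < 2 <;> by_cases hb : (i == 0 || i == L - 1) = true <;>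
        simp [hw, hb, show ¬ W ≥ 2 ↔ W < 2 by omega])]
  exact mapRows_eq L hL _ _

-- ===== VERDICT (by name: the statement is the Claim_ definition above) =====
theorem thirteen_spec : Claim_equal_thirteen := by
  intro box _
  have hne := splitOn_ne_nil' box.toList ['\n']
  have hL : 1 ≤ PySem.List.len (PySem.Chars.splitOn box.toList ['\n']) := by
    have := List.length_pos_of_ne_nil hne
    simp only [PySem.List.len_eq]
    omega
  have hW : 0 ≤ PySem.Chars.len
      (PySem.List.pyGetD (PySem.Chars.splitOn box.toList ['\n']) 0 []) := by
    simp [PySem.Chars.len_eq]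
  simp only [Spec_thirteen, thirteen, thirteen_alt]
  rw [boxes_eq _ _ hL hW]
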